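-- pv_equiv track=rewrite | github.com/wangzizhe/GateForge | gateforge/agent_modelica_rule_engine_v1.py | remove_gateforge_injected_symbol_block
-- ===== SOURCE A (Python) =====
-- def remove_gateforge_injected_symbol_block(model_text: str) -> tuple[str, int]:
--     lines = str(model_text or "").splitlines(keepends=True)
--     if not lines:
--         return str(model_text or ""), 0
--     remove_idx: set[int] = set()
--     for i, line in enumerate(lines):
--         if "__gf_" in line:
--             remove_idx.add(i)
--             for j in (i - 2, i - 1, i + 1, i + 2):
--                 if j < 0 or j >= len(lines):
--                     continue
--                 text = lines[j].strip()
--                 if "GateForge mutation" in text: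
--                     remove_idx.add(j)
--                 if text == "equation":
--                     remove_idx.add(j)
--     if not remove_idx:
--         return str(model_text or ""), 0
--     kept = [line for idx, line in enumerate(lines) if idx not in remove_idx]
--     return "".join(kept), len(remove_idx)
-- ===== SOURCE B (Python) =====
-- def remove_gateforge_injected_symbol_block(model_text: str) -> tuple[str, int]:
--     lines = str(model_text or "").splitlines(keepends=True)
--     if not lines:
--         return str(model_text or ""), 0
--     gf_set = {i for i, line in enumerate(lines) if "__gf_" in line}
--     removal = set(gf_set)
--     for j, line in enumerate(lines):
--         t = line.strip()
--         if "GateForge mutation" in t or t == "equation":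
--             if any(k in gf_set for k in range(j - 2, j + 3)):
--                 removal.add(j)
--     if not removal:
--         return str(model_text or ""), 0
--     kept = [line for j, line in enumerate(lines) if j not in removal]
--     return "".join(kept), len(removal)
-- ===== Notes on version B (the rewrite author's own statement) =====
-- stated objective: alternative
-- what changed: Instead of scanning the four neighbours of every '__gf_' line and adding markers from inside that nested loop, B builds the set of '__gf_' line indices in one pass and then, in an independent second pass over candidate marker lines (stripped 'equation' or containing 'GateForge mutation'), adds a marker line only if some '__gf_' index lies within distance 2 of it.
import Mathlib
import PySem

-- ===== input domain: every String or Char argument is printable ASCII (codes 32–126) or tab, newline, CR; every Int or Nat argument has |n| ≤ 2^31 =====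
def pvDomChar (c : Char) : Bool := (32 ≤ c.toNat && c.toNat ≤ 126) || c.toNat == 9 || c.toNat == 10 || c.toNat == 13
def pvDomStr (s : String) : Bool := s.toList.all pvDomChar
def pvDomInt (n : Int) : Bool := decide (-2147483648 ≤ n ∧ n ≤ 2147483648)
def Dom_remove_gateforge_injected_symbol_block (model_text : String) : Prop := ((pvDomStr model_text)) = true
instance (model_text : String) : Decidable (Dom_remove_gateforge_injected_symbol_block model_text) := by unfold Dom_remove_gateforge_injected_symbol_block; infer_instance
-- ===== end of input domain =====

-- B replaces A's nested neighbour scan per '__gf_' line by two independent passes (gf index set,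
-- then marker lines tested for proximity to it); objective: alternative decomposition, same cost.


-- shared helper: str.splitlines(keepends=True); hand port, exact on the ASCII domain
-- (the only line breaks occurring in Dom are '\n', '\r', '\r\n')
def pvSplitKeep : List Char → List Char → List (List Char)
  | [], acc => if acc = [] then [] else [acc.reverse]
  | '\r' :: '\n' :: rest, acc => (acc.reverse ++ ['\r', '\n']) :: pvSplitKeep rest []
  | '\r' :: rest, acc => (acc.reverse ++ ['\r']) :: pvSplitKeep rest []
  | '\n' :: rest, acc => (acc.reverse ++ ['\n']) :: pvSplitKeep rest []
  | c :: rest, acc => pvSplitKeep rest (c :: acc)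

def pySplitlinesKeep (s : String) : List String :=
  (pvSplitKeep s.toList []).map (fun cs => String.ofList cs)

-- ===== PORT A =====
-- body of A's inner neighbour loop after the bounds guard (text = lines[j].strip())
def pvInnerAdds (s : PySem.Set Int) (j : Int) (text : String) : PySem.Set Int :=
  let s := if PySem.Str.isIn "GateForge mutation" text then PySem.Set.add s j else s
  if text == "equation" then PySem.Set.add s j else s

def pvStepInner (lines : List String) (n : Int) (s : PySem.Set Int) (j : Int) : PySem.Set Int :=
  if j < 0 || n ≤ j then s
  else pvInnerAdds s j (PySem.Str.strip ((PySem.List.pyGet? lines j).getD ""))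

def pvStepA (lines : List String) (n : Int) (s : PySem.Set Int) (p : Int × String) : PySem.Set Int :=
  if PySem.Str.isIn "__gf_" p.2 then
    [p.1 - 2, p.1 - 1, p.1 + 1, p.1 + 2].foldl (pvStepInner lines n) (PySem.Set.add s p.1)
  else s

def pvRemoveIdxA (lines : List String) : PySem.Set Int :=
  (PySem.List.enumerate lines).foldl (pvStepA lines lines.length) PySem.Set.empty

def remove_gateforge_injected_symbol_block (model_text : String) : String × Int :=
  let lines := pySplitlinesKeep model_text       -- str(model_text or "") = model_text on str input
  if lines.isEmpty then (model_text, 0)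
  else
    let removeIdx := pvRemoveIdxA lines
    if removeIdx.isEmpty then (model_text, 0)
    else
      let kept := ((PySem.List.enumerate lines).filter
        (fun p => !(PySem.Set.contains removeIdx p.1))).map Prod.snd
      (PySem.Str.join "" kept, PySem.Set.len removeIdx)

-- ===== PORT B =====
def pvMarker (line : String) : Bool :=
  let t := PySem.Str.strip line
  PySem.Str.isIn "GateForge mutation" t || t == "equation"

def pvGfIdxB (lines : List String) : PySem.Set Int :=
  PySem.Set.ofList ((PySem.List.enumerate lines).filterMap
    (fun p => if PySem.Str.isIn "__gf_" p.2 then some p.1 else none))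

def pvStepB (gf : PySem.Set Int) (s : PySem.Set Int) (p : Int × String) : PySem.Set Int :=
  if pvMarker p.2 then
    if (PySem.List.pyRange (p.1 - 2) (p.1 + 3) 1).any (fun k => PySem.Set.contains gf k) then
      PySem.Set.add s p.1
    else s
  else s

def pvRemovalB (lines : List String) : PySem.Set Int :=
  let gf := pvGfIdxB lines
  (PySem.List.enumerate lines).foldl (pvStepB gf) gf

def remove_gateforge_injected_symbol_block_alt (model_text : String) : String × Int :=
  let lines := pySplitlinesKeep model_text
  if lines.isEmpty then (model_text, 0)
  else
    let removal := pvRemovalB lines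
    if removal.isEmpty then (model_text, 0)
    else
      let kept := ((PySem.List.enumerate lines).filter
        (fun p => !(PySem.Set.contains removal p.1))).map Prod.snd
      (PySem.Str.join "" kept, PySem.Set.len removal)

-- ===== PRECONDITION & SPEC =====
def Spec_remove_gateforge_injected_symbol_block (model_text : String) (out : String × Int) : Prop := out = remove_gateforge_injected_symbol_block_alt model_text
instance (model_text : String) (out : String × Int) : Decidable (Spec_remove_gateforge_injected_symbol_block model_text out) := by unfold Spec_remove_gateforge_injected_symbol_block; infer_instance

-- ===== CLAIM (what is proved, stated in full; the proofs are below) =====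
def Claim_equal_remove_gateforge_injected_symbol_block : Prop := ∀ (model_text : String), Dom_remove_gateforge_injected_symbol_block model_text → Spec_remove_gateforge_injected_symbol_block model_text (remove_gateforge_injected_symbol_block model_text)

-- ===== LEMMAS AND PROOFS =====

-- 'the line at Int index j (in range) is a marker line' as A's inner loop sees it
def pvMarkOK (lines : List String) (j : Int) : Prop :=
  0 ≤ j ∧ j < (lines.length : Int) ∧ pvMarker ((PySem.List.pyGet? lines j).getD "") = true

lemma pvMarker_eq (line : String) :
    pvMarker line = (PySem.Str.isIn "GateForge mutation" (PySem.Str.strip line)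
      || (PySem.Str.strip line == "equation")) := rfl

-- generic: membership through a foldl whose step only ever adds elements
lemma mem_foldl_or {α : Type} (step : PySem.Set Int → α → PySem.Set Int) (Q : α → Int → Prop)
    (hstep : ∀ s a x, x ∈ step s a ↔ x ∈ s ∨ Q a x) :
    ∀ (L : List α) (s : PySem.Set Int) (x : Int),
      x ∈ L.foldl step s ↔ x ∈ s ∨ ∃ p ∈ L, Q p x := by
  intro L
  induction L with
  | nil => simp
  | cons q L ih =>
    intro s x
    rw [List.foldl_cons, ih, hstep]
    constructor
    · rintro ((h | h) | ⟨p, hp, h⟩)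
      · exact Or.inl h
      · exact Or.inr ⟨q, List.mem_cons_self, h⟩
      · exact Or.inr ⟨p, List.mem_cons_of_mem _ hp, h⟩
    · rintro (h | ⟨p, hp, h⟩)
      · exact Or.inl (Or.inl h)
      · rcases List.mem_cons.mp hp with rfl | hp
        · exact Or.inl (Or.inr h)
        · exact Or.inr ⟨p, hp, h⟩

lemma mem_innerAdds (s : PySem.Set Int) (j : Int) (text : String) (x : Int) :
    x ∈ pvInnerAdds s j text ↔
      x ∈ s ∨ (x = j ∧ (PySem.Str.isIn "GateForge mutation" text || (text == "equation")) = true) := by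
  unfold pvInnerAdds
  cases hm : PySem.Str.isIn "GateForge mutation" text <;>
    cases he : (text == "equation") <;>
      simp [*, PySem.Set.mem_add]

lemma mem_stepInner (lines : List String) (s : PySem.Set Int) (j x : Int) :
    x ∈ pvStepInner lines (lines.length : Int) s j ↔ x ∈ s ∨ (x = j ∧ pvMarkOK lines j) := by
  unfold pvStepInner pvMarkOK
  split_ifs with h1
  · simp only [Bool.or_eq_true, decide_eq_true_eq] at h1
    constructor
    · exact Or.inl
    · rintro (hs | ⟨rfl, h0, hn, _⟩)
      · exact hs
      · omega
  · simp only [Bool.or_eq_true, decide_eq_true_eq, not_or, not_lt, not_le] at h1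
    rw [mem_innerAdds]
    constructor
    · rintro (hs | ⟨rfl, hc⟩)
      · exact Or.inl hs
      · exact Or.inr ⟨rfl, h1.1, h1.2, by rw [pvMarker_eq]; exact hc⟩
    · rintro (hs | ⟨rfl, _, _, hmk⟩)
      · exact Or.inl hs
      · refine Or.inr ⟨rfl, ?_⟩
        rw [pvMarker_eq] at hmk
        exact hmk

lemma mem_stepA (lines : List String) (s : PySem.Set Int) (p : Int × String) (x : Int) :
    x ∈ pvStepA lines (lines.length : Int) s p ↔
      x ∈ s ∨ (PySem.Str.isIn "__gf_" p.2 = true ∧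
        (x = p.1 ∨ (x ∈ [p.1 - 2, p.1 - 1, p.1 + 1, p.1 + 2] ∧ pvMarkOK lines x))) := by
  unfold pvStepA
  split_ifs with h
  · rw [mem_foldl_or (pvStepInner lines (lines.length : Int))
      (fun j x => x = j ∧ pvMarkOK lines j) (fun s j x => mem_stepInner lines s j x),
      PySem.Set.mem_add]
    constructor
    · rintro ((hs | hx) | ⟨j, hj, rfl, hm⟩)
      · exact Or.inl hs
      · exact Or.inr ⟨h, Or.inl hx⟩
      · exact Or.inr ⟨h, Or.inr ⟨hj, hm⟩⟩
    · rintro (hs | ⟨_, rfl | ⟨hj, hm⟩⟩)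
      · exact Or.inl (Or.inl hs)
      · exact Or.inl (Or.inr rfl)
      · exact Or.inr ⟨x, hj, rfl, hm⟩
  · tauto

lemma mem_stepB (gf s : PySem.Set Int) (p : Int × String) (x : Int) :
    x ∈ pvStepB gf s p ↔
      x ∈ s ∨ (pvMarker p.2 = true ∧ (∃ k ∈ gf, p.1 - 2 ≤ k ∧ k < p.1 + 3) ∧ x = p.1) := by
  unfold pvStepB
  split_ifs with h1 h2
  · rw [PySem.Set.mem_add]
    simp only [List.any_eq_true, PySem.List.mem_pyRange_one] at h2
    constructor
    · rintro (hs | rfl)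
      · exact Or.inl hs
      · refine Or.inr ⟨h1, ?_, rfl⟩
        obtain ⟨k, hk, hc⟩ := h2
        exact ⟨k, (PySem.Set.contains_iff gf k).mp hc, by omega⟩
    · rintro (hs | ⟨_, _, rfl⟩)
      · exact Or.inl hs
      · exact Or.inr rfl
  · simp only [List.any_eq_true, PySem.List.mem_pyRange_one] at h2
    constructor
    · exact Or.inl
    · rintro (hs | ⟨_, ⟨k, hk, hb⟩, rfl⟩)
      · exact hs
      · exact absurd ⟨k, by omega, (PySem.Set.contains_iff gf k).mpr hk⟩ h2
  · constructor
    · exact Or.inl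
    · rintro (hs | ⟨hm, _, _⟩)
      · exact hs
      · exact absurd hm h1

lemma mem_gfIdxB (lines : List String) (x : Int) :
    x ∈ pvGfIdxB lines ↔
      ∃ k : Nat, ∃ _ : k < lines.length, x = (k : Int) ∧ PySem.Str.isIn "__gf_" lines[k] = true := by
  unfold pvGfIdxB
  rw [PySem.Set.mem_ofList]
  simp only [List.mem_filterMap, PySem.List.mem_enumerate_iff]
  constructor
  · rintro ⟨p, ⟨k, hk, rfl⟩, hcond⟩
    dsimp only at hcond
    by_cases hg : PySem.Str.isIn "__gf_" lines[k] = true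
    · rw [if_pos hg] at hcond
      refine ⟨k, hk, ?_, hg⟩
      injection hcond with h
      omega
    · rw [if_neg hg] at hcond
      cases hcond
  · rintro ⟨k, hk, rfl, hg⟩
    refine ⟨((0 + (k : Int)), lines[k]), ⟨k, hk, rfl⟩, ?_⟩
    dsimp only
    rw [if_pos hg]
    norm_num

-- bridge: A's pyGet?-based line access at an in-range Nat index is plain indexing
lemma pyGetD_at_nat (lines : List String) (k : Nat) (hk : k < lines.length) :
    (PySem.List.pyGet? lines (k : Int)).getD "" = lines[k] := by
  rw [PySem.List.pyGet?_natCast]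
  simp [hk]

-- the central fact: the two removal sets have the same members
lemma mem_removal_iff (lines : List String) (x : Int) :
    x ∈ pvRemoveIdxA lines ↔ x ∈ pvRemovalB lines := by
  unfold pvRemoveIdxA pvRemovalB
  rw [mem_foldl_or (pvStepA lines (lines.length : Int))
        (fun p x => PySem.Str.isIn "__gf_" p.2 = true ∧
          (x = p.1 ∨ (x ∈ [p.1 - 2, p.1 - 1, p.1 + 1, p.1 + 2] ∧ pvMarkOK lines x)))
        (fun s p x => mem_stepA lines s p x),
      mem_foldl_or (pvStepB (pvGfIdxB lines))
        (fun p x => pvMarker p.2 = true ∧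
          (∃ k ∈ pvGfIdxB lines, p.1 - 2 ≤ k ∧ k < p.1 + 3) ∧ x = p.1)
        (fun s p x => mem_stepB (pvGfIdxB lines) s p x)]
  simp only [PySem.Set.empty, List.not_mem_nil, false_or, PySem.List.mem_enumerate_iff,
    mem_gfIdxB, List.mem_cons, List.not_mem_nil, or_false, zero_add]
  constructor
  · rintro ⟨p, ⟨k, hk, rfl⟩, hgf, hx⟩
    rcases hx with rfl | ⟨hnb, hmk⟩
    · exact Or.inl ⟨k, hk, rfl, hgf⟩
    · -- x is a marker neighbour of gf line k: B adds it in its marker pass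
      right
      rcases hmk with ⟨hx0, hxn, hm⟩
      have hxeq : x = ((x.toNat : Nat) : Int) := by omega
      have hxlt : x.toNat < lines.length := by omega
      refine ⟨((x.toNat : Int), lines[x.toNat]), ⟨x.toNat, hxlt, by rw [← hxeq]⟩, ?_, ?_, by omega⟩
      · rw [← pyGetD_at_nat lines x.toNat hxlt, ← hxeq]; exact hm
      · exact ⟨(k : Int), ⟨k, hk, rfl, hgf⟩, by omega⟩
  · rintro (⟨k, hk, rfl, hgf⟩ | ⟨p, ⟨j, hj, rfl⟩, hm, ⟨_, ⟨m, hmlen, rfl, hgfm⟩, hb⟩, rfl⟩)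
    · exact ⟨((k : Int), lines[k]), ⟨k, hk, rfl⟩, hgf, Or.inl rfl⟩
    · -- B's marker line j with gf line m within distance 2
      by_cases hjm : (j : Int) = (m : Int)
      · -- the gf witness is j itself: j is already a gf line
        have : j = m := by omega
        subst this
        exact ⟨((j : Int), lines[j]), ⟨j, hj, rfl⟩, hgfm, Or.inl rfl⟩
      · refine ⟨((m : Int), lines[m]), ⟨m, hmlen, rfl⟩, hgfm, Or.inr ⟨by omega, ?_⟩⟩
        refine ⟨by omega, by omega, ?_⟩
        rw [pyGetD_at_nat lines j hj]
        exact hm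

lemma nodup_foldl {α β : Type} (step : List α → β → List α)
    (h : ∀ s a, s.Nodup → (step s a).Nodup) :
    ∀ (L : List β) (s : List α), s.Nodup → (L.foldl step s).Nodup := by
  intro L
  induction L with
  | nil => intro s hs; exact hs
  | cons b L ih => intro s hs; exact ih _ (h s b hs)

lemma nodup_removeIdxA (lines : List String) : (pvRemoveIdxA lines).Nodup := by
  unfold pvRemoveIdxA
  apply nodup_foldl
  · intro s p hs
    unfold pvStepA
    split_ifs with h
    · apply nodup_foldl
      · intro s j hsj
        unfold pvStepInner pvInnerAdds
        split_ifs <;>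
          first
            | exact hsj
            | exact PySem.Set.nodup_add _ _ hsj
            | exact PySem.Set.nodup_add _ _ (PySem.Set.nodup_add _ _ hsj)
      · exact PySem.Set.nodup_add s p.1 hs
    · exact hs
  · exact List.nodup_nil

lemma nodup_removalB (lines : List String) : (pvRemovalB lines).Nodup := by
  unfold pvRemovalB
  apply nodup_foldl
  · intro s p hs
    unfold pvStepB
    split_ifs <;> first | exact hs | exact PySem.Set.nodup_add _ _ hs
  · exact PySem.Set.nodup_ofList _

-- ===== VERDICT (by name: the statement is the Claim_ definition above) =====
theorem remove_gateforge_injected_symbol_block_spec : Claim_equal_remove_gateforge_injected_symbol_block := by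
  intro model_text _
  unfold Spec_remove_gateforge_injected_symbol_block
  unfold remove_gateforge_injected_symbol_block remove_gateforge_injected_symbol_block_alt
  set lines := pySplitlinesKeep model_text with hlines
  by_cases hempty : lines.isEmpty
  · simp [hempty]
  · simp only [hempty, if_false, Bool.false_eq_true]
    have hperm : (pvRemoveIdxA lines).Perm (pvRemovalB lines) :=
      (List.perm_ext_iff_of_nodup (nodup_removeIdxA lines) (nodup_removalB lines)).mpr
        (fun x => mem_removal_iff lines x)
    have hAe : (pvRemoveIdxA lines).isEmpty = (pvRemovalB lines).isEmpty := by
      have hl := hperm.length_eq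
      rw [Bool.eq_iff_iff, List.isEmpty_iff_length_eq_zero, List.isEmpty_iff_length_eq_zero]
      omega
    have hcont : ∀ y : Int, PySem.Set.contains (pvRemoveIdxA lines) y
        = PySem.Set.contains (pvRemovalB lines) y := by
      intro y
      rw [Bool.eq_iff_iff, PySem.Set.contains_iff, PySem.Set.contains_iff]
      exact mem_removal_iff lines y
    rw [hAe]
    by_cases hBe : (pvRemovalB lines).isEmpty
    · simp [hBe]
    · simp only [hBe, if_false, Bool.false_eq_true]
      have hfilter : (PySem.List.enumerate lines).filter
            (fun p => !(PySem.Set.contains (pvRemoveIdxA lines) p.1))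
          = (PySem.List.enumerate lines).filter
            (fun p => !(PySem.Set.contains (pvRemovalB lines) p.1)) :=
        List.filter_congr (fun p _ => by rw [hcont p.1])
      have hlen : PySem.Set.len (pvRemoveIdxA lines) = PySem.Set.len (pvRemovalB lines) := by
        unfold PySem.Set.len
        rw [hperm.length_eq]
      rw [hfilter, hlen]
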